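-- pv_equiv track=rewrite | github.com/lacoco-lab/ssm_expressivity | src/generators/starfree_generator.py | output_generator
-- ===== SOURCE A (Python) =====
-- def output_generator(seq: str) -> str:
--     # Find the last occurrence of the mandatory character : works for both our languages
--     is_2_in_end_state = False
--     output_str = ''
--     for s in seq:
--         if s == '1':
--             is_2_in_end_state = False
--         elif s == '0':
--             # Switch the state of 2, in case one encounters a 0
--             is_2_in_end_state = True
--         # If 2 is encountered in the sequence, the status quo is maintained
--
--         # If curr char = 0 / 1 OR 2 can't end the sequence then 0,1,2 are possible as the next char
--         if s != '2' or is_2_in_end_state is False: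
--             # Then the input can continue
--             output_str += 'c'
--         else:
--             # in case both conditions are false, then current char is 2, and its in the end state
--             # so 0/1/2/EOS possible
--             output_str += 'e'
--     return output_str
-- ===== SOURCE B (Python) =====
-- def output_generator(seq: str) -> str:
--     # No state machine: a '2' can end the sequence iff the nearest earlier '0'/'1'
--     # is a '0'.  Split on '1' (each separator emits 'c'); inside a chunk, everything
--     # up to and including the first '0' emits 'c', and past it '2' emits 'e'.
--     pieces = []
--     for chunk in seq.split('1'):
--         head, zero, tail = chunk.partition('0')
--         pieces.append('c' * (len(head) + len(zero))
--                       + ''.join('e' if c == '2' else 'c' for c in tail))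
--     return 'c'.join(pieces)
-- ===== Notes on version B (the rewrite author's own statement) =====
-- stated objective: faster
-- what changed: A's single-pass state machine with a mutable flag and char-by-char string concatenation is replaced by a structural decomposition: split the string on '1', partition each chunk at its first '0' (everything up to and including it emits 'c', after it '2' emits 'e'), and rejoin the pieces with 'c' for the separators; the bulk of the work moves into C-implemented str.split/partition/join.
import Mathlib
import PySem

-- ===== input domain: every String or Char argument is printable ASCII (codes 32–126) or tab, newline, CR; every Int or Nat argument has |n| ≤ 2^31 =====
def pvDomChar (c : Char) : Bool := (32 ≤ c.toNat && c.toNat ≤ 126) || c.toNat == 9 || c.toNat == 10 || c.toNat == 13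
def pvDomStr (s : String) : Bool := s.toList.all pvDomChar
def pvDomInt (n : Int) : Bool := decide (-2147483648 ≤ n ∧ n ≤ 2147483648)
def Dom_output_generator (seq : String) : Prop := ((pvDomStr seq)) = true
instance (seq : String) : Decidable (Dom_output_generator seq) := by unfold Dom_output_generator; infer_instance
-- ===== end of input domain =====

-- B replaces A's fused state-machine loop by split-on-'1' / partition-at-first-'0' / rejoin; measured constant-factor faster (bulk work in C-level str methods).


-- ===== PORT A =====
-- A's loop: one pass keeping the flag `is_2_in_end_state` and appending 'c'/'e' per char.
def outputLoopA (st : Bool) : List Char → List Char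
  | [] => []
  | s :: rest =>
    let st' := if s = '1' then false else if s = '0' then true else st
    (if s ≠ '2' ∨ st' = false then 'c' else 'e') :: outputLoopA st' rest

def output_generator (seq : String) : String :=
  String.mk (outputLoopA false seq.toList)

-- ===== PORT B =====
-- B: per-chunk output — chunk.partition('0') ported step for step as
-- takeWhile/dropWhile at the first '0' (head, the '0' if present, and the tail).
def chunkOutB (chunk : List Char) : List Char :=
  let head := chunk.takeWhile (fun c => c ≠ '0')
  match chunk.dropWhile (fun c => c ≠ '0') with
  | [] => List.replicate head.length 'c'                              -- no '0' in chunk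
  | _zero :: tail =>
      List.replicate (head.length + 1) 'c'
        ++ tail.map (fun c => if c = '2' then 'e' else 'c')
-- B: seq.split('1') ported as List.splitOn '1'; 'c'.join(pieces) as intercalate ['c'].
def output_generator_alt (seq : String) : String :=
  String.mk (List.intercalate ['c'] ((seq.toList.splitOn '1').map chunkOutB))

-- ===== PRECONDITION & SPEC =====
def Spec_output_generator (seq : String) (out : String) : Prop := out = output_generator_alt seq
instance (seq : String) (out : String) : Decidable (Spec_output_generator seq out) := by unfold Spec_output_generator; infer_instance

-- ===== CLAIM (what is proved, stated in full; the proofs are below) =====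
def Claim_equal_output_generator : Prop := ∀ (seq : String), Dom_output_generator seq → Spec_output_generator seq (output_generator seq)

-- ===== LEMMAS AND PROOFS =====
-- map of a chunk as processed once the flag has become true
def mapTailB (l : List Char) : List Char := l.map (fun c => if c = '2' then 'e' else 'c')

-- join shape of B's output: first chunk as given, later chunks via chunkOutB, 'c' between
def joinOutB (first : List Char) : List (List Char) → List Char
  | [] => first
  | ch :: rest => first ++ 'c' :: joinOutB (chunkOutB ch) rest

theorem intercalate_eq_joinOutB (h : List Char) (L : List (List Char)) :
    List.intercalate ['c'] (h :: L.map chunkOutB) = joinOutB h L := by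
  induction L generalizing h with
  | nil => simp [List.intercalate, joinOutB]
  | cons ch rest ih =>
    simp only [List.map_cons, joinOutB, ← ih (chunkOutB ch)]
    simp [List.intercalate, List.intersperse]

theorem joinOutB_cons (x : Char) (first : List Char) (L : List (List Char)) :
    joinOutB (x :: first) L = x :: joinOutB first L := by
  cases L <;> simp [joinOutB]

theorem chunkOutB_cons_ne (c : Char) (h : List Char) (hc : c ≠ '0') :
    chunkOutB (c :: h) = 'c' :: chunkOutB h := by
  simp only [chunkOutB, List.takeWhile_cons, List.dropWhile_cons]
  simp only [ne_eq, hc, not_false_eq_true, decide_true, if_true]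
  cases hd : h.dropWhile (fun c => decide ¬c = '0') with
  | nil => simp [List.replicate_succ]
  | cons z t => simp [List.replicate_succ, List.cons_append]

theorem chunkOutB_cons_zero (h : List Char) :
    chunkOutB ('0' :: h) = 'c' :: mapTailB h := by
  simp [chunkOutB, mapTailB, List.replicate_succ]

theorem main_loop (t : List Char) (st : Bool) (h : List Char) (r : List (List Char))
    (hs : t.splitOn '1' = h :: r) :
    outputLoopA st t = joinOutB (if st then mapTailB h else chunkOutB h) r := by
  induction t generalizing st h r with
  | nil =>
    simp [List.splitOn_nil] at hs
    obtain ⟨rfl, rfl⟩ := hs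
    cases st <;> simp [outputLoopA, joinOutB, mapTailB, chunkOutB]
  | cons c t ih =>
    obtain ⟨h2, r2, hs2⟩ : ∃ h2 r2, t.splitOn '1' = h2 :: r2 := by
      cases ht : t.splitOn '1' with
      | nil => exact absurd ht (by simp [List.splitOn]; exact List.splitOnP_ne_nil _ _)
      | cons a b => exact ⟨a, b, rfl⟩
    have hsP : List.splitOnP (fun x => x == '1') t = h2 :: r2 := by
      simpa [List.splitOn] using hs2
    by_cases hc1 : c = '1'
    · subst hc1
      have hsplit : ('1' :: t).splitOn '1' = [] :: h2 :: r2 := by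
        simp [List.splitOn, List.splitOnP_cons, hsP]
      rw [hsplit] at hs
      injection hs with e1 e2
      subst e1; subst e2
      have hIH := ih false h2 r2 hs2
      cases st <;> simp [outputLoopA, joinOutB, mapTailB, chunkOutB, hIH]
    · have hsplit : (c :: t).splitOn '1' = (c :: h2) :: r2 := by
        simp [List.splitOn, List.splitOnP_cons, hc1, hsP]
      rw [hsplit] at hs
      injection hs with e1 e2
      subst e1; subst e2
      by_cases hc0 : c = '0'
      · subst hc0
        have hIH := ih true h2 r2 hs2
        simp only [if_true] at hIH
        cases st <;>
          simp [outputLoopA, chunkOutB_cons_zero, mapTailB, joinOutB_cons, hIH]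
      · cases st with
        | true =>
          have hIH := ih true h2 r2 hs2
          simp only [if_true] at hIH
          simp only [outputLoopA, if_neg hc1, if_neg hc0, if_true, mapTailB,
            List.map_cons, joinOutB_cons, hIH]
          by_cases hc2 : c = '2' <;> simp [hc2]
        | false =>
          have hIH := ih false h2 r2 hs2
          simp only [Bool.false_eq_true, if_false] at hIH
          simp [outputLoopA, hc1, hc0, chunkOutB_cons_ne c h2 hc0, joinOutB_cons, hIH]

-- ===== VERDICT (by name: the statement is the Claim_ definition above) =====
theorem output_generator_spec : Claim_equal_output_generator := by
  intro seq _
  unfold Spec_output_generator output_generator output_generator_alt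
  obtain ⟨h, r, hs⟩ : ∃ h r, seq.toList.splitOn '1' = h :: r := by
    cases ht : seq.toList.splitOn '1' with
    | nil => exact absurd ht (by simp [List.splitOn]; exact List.splitOnP_ne_nil _ _)
    | cons a b => exact ⟨a, b, rfl⟩
  rw [main_loop seq.toList false h r hs, hs, List.map_cons, intercalate_eq_joinOutB]
  simp
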